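-- pv_equiv track=rewrite | github.com/ozh-ai/Personal-Projects | Tuples Q5.py | findExtremeDivisors
-- ===== SOURCE A (Python) =====
-- def findExtremeDivisors(n1,n2):
--     smaller = min(n1,n2)
--     minVal,maxVal = (None,None) #initialise values to be none
--     for i in range(1,smaller + 1):
--         if n1%i == 0 and n2%i == 0:
--             if minVal == None or minVal > i:
--                 minVal = i
--             if maxVal == None or maxVal < i:
--                 maxVal = i
--     return (minVal,maxVal)
-- ===== SOURCE B (Python) =====
-- def findExtremeDivisors(n1, n2):
--     if min(n1, n2) < 1:
--         return (None, None)
--     a, b = n1, n2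
--     while b > 0:
--         a, b = b, a % b
--     return (1, a)
-- ===== Notes on version B (the rewrite author's own statement) =====
-- stated objective: faster
-- what changed: Replaces the O(min(n1,n2)) scan of all candidate divisors with a closed form: the smallest common divisor is always 1 and the largest is gcd(n1,n2) computed by the Euclidean algorithm, with (None,None) when min(n1,n2) < 1.
import Mathlib
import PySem

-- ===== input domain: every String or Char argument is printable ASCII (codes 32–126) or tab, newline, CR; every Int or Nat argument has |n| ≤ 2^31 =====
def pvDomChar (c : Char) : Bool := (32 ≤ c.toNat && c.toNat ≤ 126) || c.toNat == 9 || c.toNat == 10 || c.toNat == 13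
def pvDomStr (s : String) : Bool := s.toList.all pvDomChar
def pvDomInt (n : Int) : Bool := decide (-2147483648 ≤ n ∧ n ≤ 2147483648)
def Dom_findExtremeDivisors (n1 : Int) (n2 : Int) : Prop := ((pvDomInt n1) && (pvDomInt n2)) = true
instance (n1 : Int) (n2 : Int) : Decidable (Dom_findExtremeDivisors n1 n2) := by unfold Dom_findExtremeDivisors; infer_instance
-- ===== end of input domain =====

-- B replaces A's linear scan over 1..min(n1,n2) by a closed form: smallest common
-- divisor is 1, largest is gcd(n1,n2) via the Euclidean algorithm (objective: faster).

-- ===== PORT A =====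
-- running-min update: 'if minVal == None or minVal > i: minVal = i'
def pvStepMin (o : Option Int) (i : Int) : Option Int :=
  match o with
  | none => some i
  | some v => if v > i then some i else some v

-- running-max update: 'if maxVal == None or maxVal < i: maxVal = i'
def pvStepMax (o : Option Int) (i : Int) : Option Int :=
  match o with
  | none => some i
  | some v => if v < i then some i else some v

def pvStepA (n1 n2 : Int) (st : Option Int × Option Int) (i : Int) : Option Int × Option Int :=
  if PySem.Int.mod n1 i = 0 ∧ PySem.Int.mod n2 i = 0 then
    (pvStepMin st.1 i, pvStepMax st.2 i)
  else st

def findExtremeDivisors (n1 : Int) (n2 : Int) : List (Option Int) :=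
  let smaller := min n1 n2
  let st := (PySem.List.pyRange 1 (smaller + 1) 1).foldl (pvStepA n1 n2) (none, none)
  [st.1, st.2]

-- ===== PORT B =====
-- 'while b > 0: a, b = b, a % b; return a'
def pvEuclid (a b : Int) : Int :=
  if h : 0 < b then pvEuclid b (PySem.Int.mod a b) else a
termination_by b.toNat
decreasing_by
  simp only [PySem.Int.mod_eq_emod_of_pos (a := a) h]
  have h2 : a % b < b := Int.emod_lt_of_pos a h
  omega

def findExtremeDivisors_alt (n1 : Int) (n2 : Int) : List (Option Int) :=
  if min n1 n2 < 1 then [none, none]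
  else [some 1, some (pvEuclid n1 n2)]

-- ===== PRECONDITION & SPEC =====
def Spec_findExtremeDivisors (n1 : Int) (n2 : Int) (out : List (Option Int)) : Prop := out = findExtremeDivisors_alt n1 n2
instance (n1 : Int) (n2 : Int) (out : List (Option Int)) : Decidable (Spec_findExtremeDivisors n1 n2 out) := by unfold Spec_findExtremeDivisors; infer_instance

-- ===== CLAIM (what is proved, stated in full; the proofs are below) =====
def Claim_equal_findExtremeDivisors : Prop := ∀ (n1 : Int) (n2 : Int), Dom_findExtremeDivisors n1 n2 → Spec_findExtremeDivisors n1 n2 (findExtremeDivisors n1 n2)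

-- ===== LEMMAS AND PROOFS =====

-- the fold acts componentwise on the elements passing the divisor test
theorem pv_foldl_split (n1 n2 : Int) (L : List Int) (a b : Option Int) :
    L.foldl (pvStepA n1 n2) (a, b) =
      ((L.filter (fun i => decide (PySem.Int.mod n1 i = 0 ∧ PySem.Int.mod n2 i = 0))).foldl pvStepMin a,
       (L.filter (fun i => decide (PySem.Int.mod n1 i = 0 ∧ PySem.Int.mod n2 i = 0))).foldl pvStepMax b) := by
  induction L generalizing a b with
  | nil => simp
  | cons x t ih =>
    by_cases h : PySem.Int.mod n1 x = 0 ∧ PySem.Int.mod n2 x = 0 <;>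
      simp [pvStepA, h, ih]

theorem pv_foldl_min (L : List Int) (x : Int) :
    ∀ (o : Option Int), (o = none → x ∈ L) →
    (∀ m, o = some m → x ≤ m ∧ (x ∈ L ∨ x = m)) →
    (∀ y ∈ L, x ≤ y) →
    L.foldl pvStepMin o = some x := by
  induction L with
  | nil =>
    intro o h1 h2 _
    match o with
    | none => simp at h1
    | some m =>
      obtain ⟨hxm, hm⟩ := h2 m rfl
      simp at hm
      simp [hm]
  | cons a t ih =>
    intro o h1 h2 hlb
    have hax : x ≤ a := hlb a (by simp)
    have hstep : ∃ m', pvStepMin o a = some m' ∧ x ≤ m' ∧ (x ∈ t ∨ x = m') := by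
      match o with
      | none =>
        refine ⟨a, rfl, hax, ?_⟩
        rcases List.mem_cons.mp (h1 rfl) with h | h
        · exact Or.inr h
        · exact Or.inl h
      | some v =>
        obtain ⟨hxv, hv⟩ := h2 v rfl
        by_cases hva : v > a
        · have he : pvStepMin (some v) a = some a := by simp [pvStepMin, hva]
          refine ⟨a, he, hax, ?_⟩
          rcases hv with hv | hv
          · rcases List.mem_cons.mp hv with hv | hv
            · exact Or.inr hv
            · exact Or.inl hv
          · exact Or.inr (by omega)
        · have he : pvStepMin (some v) a = some v := by simp [pvStepMin, hva]
          refine ⟨v, he, hxv, ?_⟩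
          rcases hv with hv | hv
          · rcases List.mem_cons.mp hv with hv | hv
            · exact Or.inr (by omega)
            · exact Or.inl hv
          · exact Or.inr hv
    obtain ⟨m', hm', hxm', hmem⟩ := hstep
    simp only [List.foldl_cons, hm']
    refine ih (some m') (by simp) ?_ (fun y hy => hlb y (by simp [hy]))
    intro m hm
    injection hm with hmm
    subst hmm
    refine ⟨hxm', ?_⟩
    rcases hmem with h | h
    · exact Or.inl h
    · exact Or.inr h

theorem pv_foldl_max (L : List Int) (x : Int) :
    ∀ (o : Option Int), (o = none → x ∈ L) →
    (∀ m, o = some m → m ≤ x ∧ (x ∈ L ∨ x = m)) →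
    (∀ y ∈ L, y ≤ x) →
    L.foldl pvStepMax o = some x := by
  induction L with
  | nil =>
    intro o h1 h2 _
    match o with
    | none => simp at h1
    | some m =>
      obtain ⟨hxm, hm⟩ := h2 m rfl
      simp at hm
      simp [hm]
  | cons a t ih =>
    intro o h1 h2 hub
    have hax : a ≤ x := hub a (by simp)
    have hstep : ∃ m', pvStepMax o a = some m' ∧ m' ≤ x ∧ (x ∈ t ∨ x = m') := by
      match o with
      | none =>
        refine ⟨a, rfl, hax, ?_⟩
        rcases List.mem_cons.mp (h1 rfl) with h | h
        · exact Or.inr h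
        · exact Or.inl h
      | some v =>
        obtain ⟨hxv, hv⟩ := h2 v rfl
        by_cases hva : v < a
        · have he : pvStepMax (some v) a = some a := by simp [pvStepMax, hva]
          refine ⟨a, he, hax, ?_⟩
          rcases hv with hv | hv
          · rcases List.mem_cons.mp hv with hv | hv
            · exact Or.inr hv
            · exact Or.inl hv
          · exact Or.inr (by omega)
        · have he : pvStepMax (some v) a = some v := by simp [pvStepMax, hva]
          refine ⟨v, he, hxv, ?_⟩
          rcases hv with hv | hv
          · rcases List.mem_cons.mp hv with hv | hv
            · exact Or.inr (by omega)
            · exact Or.inl hv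
          · exact Or.inr hv
    obtain ⟨m', hm', hxm', hmem⟩ := hstep
    simp only [List.foldl_cons, hm']
    refine ih (some m') (by simp) ?_ (fun y hy => hub y (by simp [hy]))
    intro m hm
    injection hm with hmm
    subst hmm
    refine ⟨hxm', ?_⟩
    rcases hmem with h | h
    · exact Or.inl h
    · exact Or.inr h

theorem pvEuclid_eq_gcd : ∀ (n : Nat) (a b : Int), b.toNat ≤ n → 0 ≤ a → 0 ≤ b →
    pvEuclid a b = (Int.gcd a b : Int) := by
  intro n
  induction n with
  | zero =>
    intro a b hn ha hb
    have hb0 : b = 0 := by omega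
    subst hb0
    rw [pvEuclid.eq_def]
    simp only [lt_irrefl, dite_false, Int.gcd_zero_right]
    exact (Int.natAbs_of_nonneg ha).symm
  | succ n ih =>
    intro a b hn ha hb
    rw [pvEuclid.eq_def]
    split_ifs with h
    · have hmod : PySem.Int.mod a b = a % b := PySem.Int.mod_eq_emod_of_pos (a := a) h
      have h1 : 0 ≤ a % b := Int.emod_nonneg a (by omega)
      have h2 : a % b < b := Int.emod_lt_of_pos a h
      have h4 : (a % b).toNat < b.toNat := by omega
      have h5 : (a % b).toNat ≤ n := Nat.lt_succ_iff.mp (Nat.lt_of_lt_of_le h4 hn)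
      rw [hmod, ih b (a % b) h5 hb h1]
      congr 1
      have e1 : b.natAbs = b.toNat := by omega
      have e2 : (a % b).natAbs = (a % b).toNat := by omega
      have e3 : a.natAbs = a.toNat := by omega
      have hmn : (a % b).toNat = a.toNat % b.toNat := by
        conv_lhs => rw [(Int.toNat_of_nonneg ha).symm, (Int.toNat_of_nonneg hb).symm]
        rw [← Int.natCast_mod, Int.toNat_natCast]
      show Int.gcd b (a % b) = Int.gcd a b
      simp only [Int.gcd, e1, e2, e3, hmn]
      rw [Nat.gcd_comm, ← Nat.gcd_rec, Nat.gcd_comm]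
    · have hb0 : b = 0 := by omega
      subst hb0
      simp only [Int.gcd_zero_right]
      exact (Int.natAbs_of_nonneg ha).symm

-- ===== VERDICT (by name: the statement is the Claim_ definition above) =====
theorem findExtremeDivisors_spec : Claim_equal_findExtremeDivisors := by
  intro n1 n2 _
  unfold Spec_findExtremeDivisors findExtremeDivisors findExtremeDivisors_alt
  by_cases hs : min n1 n2 < 1
  · have : PySem.List.pyRange 1 (min n1 n2 + 1) 1 = [] :=
      PySem.List.pyRange_one_eq_nil (by omega)
    simp [this, hs]
  · rw [not_lt] at hs
    have h1 : (1 : Int) ≤ n1 := le_trans hs (min_le_left _ _)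
    have h2 : (1 : Int) ≤ n2 := le_trans hs (min_le_right _ _)
    have hgpos : (0 : Int) < (Int.gcd n1 n2 : Int) := by
      exact_mod_cast Int.gcd_pos_iff.mpr (Or.inl (by omega))
    have hgd1 : (Int.gcd n1 n2 : Int) ∣ n1 := Int.gcd_dvd_left n1 n2
    have hgd2 : (Int.gcd n1 n2 : Int) ∣ n2 := Int.gcd_dvd_right n1 n2
    have hgle : (Int.gcd n1 n2 : Int) ≤ min n1 n2 :=
      le_min (Int.le_of_dvd (by omega) hgd1) (Int.le_of_dvd (by omega) hgd2)
    have hmemD : ∀ i : Int,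
        i ∈ (PySem.List.pyRange 1 (min n1 n2 + 1) 1).filter
              (fun i => decide (PySem.Int.mod n1 i = 0 ∧ PySem.Int.mod n2 i = 0)) ↔
        (1 ≤ i ∧ i ≤ min n1 n2 ∧ i ∣ n1 ∧ i ∣ n2) := by
      intro i
      simp only [List.mem_filter, PySem.List.mem_pyRange_one,
        decide_eq_true_eq, PySem.Int.mod_eq_zero_iff_dvd]
      omega
    have h1D := (hmemD 1).mpr ⟨le_refl 1, hs, one_dvd _, one_dvd _⟩
    have hgD := (hmemD (Int.gcd n1 n2 : Int)).mpr ⟨by omega, hgle, hgd1, hgd2⟩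
    have hfold := pv_foldl_split n1 n2 (PySem.List.pyRange 1 (min n1 n2 + 1) 1) none none
    have hmin := pv_foldl_min _ 1 none (fun _ => h1D) (by simp)
        (fun y hy => ((hmemD y).mp hy).1)
    have hmax := pv_foldl_max _ (Int.gcd n1 n2 : Int) none (fun _ => hgD) (by simp)
        (fun y hy => by
          obtain ⟨hy1, _, hyd1, hyd2⟩ := (hmemD y).mp hy
          refine Int.le_of_dvd hgpos ?_
          have hdg : y ∣ GCDMonoid.gcd n1 n2 := dvd_gcd hyd1 hyd2
          rwa [← Int.coe_gcd] at hdg)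
    have heuc : pvEuclid n1 n2 = (Int.gcd n1 n2 : Int) :=
      pvEuclid_eq_gcd n2.toNat n1 n2 (le_refl _) (by omega) (by omega)
    simp only [hfold, hmin, hmax, if_neg (by omega : ¬ min n1 n2 < 1), heuc]
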